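-- pv_equiv track=rewrite | github.com/andreregino/my-leetcode-answers | 1954-replace-all-digits-with-characters/1954-replace-all-digits-with-characters.py | replaceDigits
-- ===== SOURCE A (Python) =====
-- def replaceDigits(s: str) -> str:
--     final_string = ""
--     for i, letter_number in enumerate(s):
--         if i % 2 == 1:
--             final_string += chr(int(ord(s[i-1])) + int(letter_number))
--         else:
--             final_string += letter_number
--     return final_string
-- ===== SOURCE B (Python) =====
-- def replaceDigits(s: str) -> str:
--     out = []
--     for j in range(0, len(s), 2):
--         out.append(s[j])
--         if j + 1 < len(s):
--             out.append(chr(ord(s[j]) + int(s[j + 1])))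
--     return "".join(out)
-- ===== Notes on version B (the rewrite author's own statement) =====
-- stated objective: alternative
-- what changed: B iterates over letter/digit pairs with a stride-2 index loop (appending the letter and, when present, its shifted digit in the same iteration) and joins a list at the end, instead of A's per-character scan with an i % 2 parity branch and repeated string concatenation.
import Mathlib
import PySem

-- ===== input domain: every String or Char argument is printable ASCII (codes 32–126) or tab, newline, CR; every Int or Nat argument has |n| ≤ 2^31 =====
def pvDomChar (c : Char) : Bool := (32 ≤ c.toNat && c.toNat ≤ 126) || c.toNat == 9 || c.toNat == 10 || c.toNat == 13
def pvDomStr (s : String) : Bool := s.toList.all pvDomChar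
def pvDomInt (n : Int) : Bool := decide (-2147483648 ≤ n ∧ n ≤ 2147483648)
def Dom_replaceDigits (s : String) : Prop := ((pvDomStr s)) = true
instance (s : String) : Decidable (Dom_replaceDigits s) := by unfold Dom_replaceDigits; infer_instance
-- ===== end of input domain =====

-- B walks letter/digit pairs with a stride-2 loop instead of A's per-character scan with an i % 2 parity branch; same cost, different decomposition.


-- ===== PORT A =====
-- int(one-char string): exact when the char is an ASCII digit; Python raises ValueError otherwise (those inputs are outside Pre_).
def pyIntChar (c : Char) : Int := if c.isDigit then (c.toNat : Int) - 48 else 0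

def replaceDigits (s : String) : String :=
  let cs := s.toList
  String.mk ((PySem.List.enumerate cs 0).foldl
    (fun acc p =>
      if PySem.Int.mod p.1 2 == 1 then
        acc ++ [Char.ofNat (((((PySem.List.pyGet? cs (p.1 - 1)).getD ' ').toNat : Int) + pyIntChar p.2).toNat)]
      else
        acc ++ [p.2]) [])

-- ===== PORT B =====
-- Source B's stride-2 loop: one letter/digit pair per iteration; [c] is the trailing letter of an odd-length string.
def replaceDigits_altGo : List Char → List Char
  | [] => []
  | [c] => [c]
  | c :: d :: rest =>
      c :: Char.ofNat (((c.toNat : Int) + pyIntChar d).toNat) :: replaceDigits_altGo rest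

def replaceDigits_alt (s : String) : String :=
  String.mk (replaceDigits_altGo s.toList)

-- ===== PRECONDITION & SPEC =====
-- Pre_ excludes exactly the strings with a non-digit character at an odd index, on which the Python A (and B) raises ValueError in int().
def Pre_replaceDigits (s : String) : Prop :=
  ∀ p ∈ PySem.List.enumerate s.toList 0, PySem.Int.mod p.1 2 = 1 → p.2.isDigit = true
instance (s : String) : Decidable (Pre_replaceDigits s) := by unfold Pre_replaceDigits; infer_instance
def pvWitness_replaceDigits : String := "a1b2c"

def Spec_replaceDigits (s : String) (out : String) : Prop := out = replaceDigits_alt s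
instance (s : String) (out : String) : Decidable (Spec_replaceDigits s out) := by unfold Spec_replaceDigits; infer_instance

-- ===== CLAIM (what is proved, stated in full; the proofs are below) =====
def Claim_equal_replaceDigits : Prop := ∀ (s : String), Dom_replaceDigits s → Pre_replaceDigits s → Spec_replaceDigits s (replaceDigits s)

-- ===== LEMMAS AND PROOFS =====
-- Loop invariant: folding A's body over enumerate (drop k full) k (k even) appends exactly B's pair-walk of the suffix.
lemma replaceDigits_go (full : List Char) (cs : List Char) :
    ∀ (k : Nat) (acc : List Char), k % 2 = 0 → full.drop k = cs →
    (PySem.List.enumerate cs (k : Int)).foldl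
      (fun acc p =>
        if PySem.Int.mod p.1 2 == 1 then
          acc ++ [Char.ofNat (((((PySem.List.pyGet? full (p.1 - 1)).getD ' ').toNat : Int) + pyIntChar p.2).toNat)]
        else
          acc ++ [p.2]) acc
      = acc ++ replaceDigits_altGo cs := by
  induction cs using replaceDigits_altGo.induct with
  | case1 =>
      intro k acc _ _
      simp [PySem.List.enumerate, replaceDigits_altGo]
  | case2 c =>
      intro k acc hk _
      have h1 : PySem.Int.mod (k : Int) 2 = ((k % 2 : Nat) : Int) := PySem.Int.mod_natCast k 2
      simp [PySem.List.enumerate, replaceDigits_altGo]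
      intro h
      exact absurd h (by omega)
  | case3 c d rest ih =>
      intro k acc hk hdrop
      have hfullk : full[k]? = some c := by
        have h0 : (full.drop k)[0]? = some c := by rw [hdrop]; rfl
        rw [List.getElem?_drop] at h0
        simp at h0
        exact h0
      have h1 : PySem.Int.mod (k : Int) 2 = ((k % 2 : Nat) : Int) := PySem.Int.mod_natCast k 2
      have h2 : PySem.Int.mod ((k : Int) + 1) 2 = (((k + 1) % 2 : Nat) : Int) := by
        have h := PySem.Int.mod_natCast (k + 1) 2
        exact_mod_cast h
      have hk1 : (k + 1) % 2 = 1 := by omega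
      have hget : PySem.List.pyGet? full ((k : Int) + 1 - 1) = some c := by
        have : ((k : Int) + 1 - 1) = (k : Nat) := by push_cast; ring
        rw [this, PySem.List.pyGet?_natCast, hfullk]
      have hdrop2 : full.drop (k + 2) = rest := by
        have : full.drop (k + 2) = (full.drop k).drop 2 := by
          rw [List.drop_drop]
        simp [this, hdrop]
      have ih' := ih (k + 2) (acc ++ [c] ++ [Char.ofNat (((c.toNat : Int) + pyIntChar d).toNat)])
        (by omega) hdrop2
      simp only [PySem.List.enumerate_cons, List.foldl_cons, h1, hk, h2, hk1, hget,
        replaceDigits_altGo]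
      norm_num at ih' ⊢
      rw [show ((k : Int) + 1 + 1) = (k : Int) + 2 by ring, ih']

-- ===== VERDICT (by name: the statement is the Claim_ definition above) =====
theorem replaceDigits_spec : Claim_equal_replaceDigits := by
  intro s _ _
  unfold Spec_replaceDigits
  have h := replaceDigits_go s.toList s.toList 0 [] (by norm_num) (by simp)
  simp only [replaceDigits, replaceDigits_alt]
  exact congrArg String.mk (by simpa using h)
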